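-- pv_equiv track=rewrite | github.com/emmett1999/fighter-odds-calc | FOC_other_fight_odds_algs.py | find_opponent_result_dict
-- ===== SOURCE A (Python) =====
-- def find_opponent_result_dict(an_opponent_dict):
--     """Returns an opponent dictionary where the values are -1 for all losses, 0 for mixed results, and 1 for all wins"""
--     # TODO: Account for NC and non win or loss results.
--     result_dict = {}
--     for k in an_opponent_dict.keys():
--         some_fights = an_opponent_dict[k]
--         initial = some_fights[0][0]
--         if initial == "Win":
--             result = 1
--         else:
--             result = -1
--         for f in some_fights:
--             if f[0] != initial:
--                 result = 0
--                 break
--         result_dict[k] = result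
--     return result_dict
-- ===== SOURCE B (Python) =====
-- def find_opponent_result_dict(an_opponent_dict):
--     """Returns an opponent dictionary where the values are -1 for all losses, 0 for mixed results, and 1 for all wins"""
--     result_dict = {}
--     for k, fights in an_opponent_dict.items():
--         firsts = sorted(f[0] for f in fights)
--         if firsts[0] != firsts[-1]:
--             result_dict[k] = 0
--         else:
--             result_dict[k] = 1 if firsts[0] == "Win" else -1
--     return result_dict
-- ===== Notes on version B (the rewrite author's own statement) =====
-- stated objective: alternative
-- what changed: Replaces A's sentinel-plus-early-break mismatch scan with sorting the first results per opponent and comparing the smallest against the largest (order statistics: mixed iff min != max).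
-- outside the precondition, e.g. on find_opponent_result_dict({'x': [['Win'], ['Loss'], []]}): A returns {'x': 0}, B raises IndexError
import Mathlib
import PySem

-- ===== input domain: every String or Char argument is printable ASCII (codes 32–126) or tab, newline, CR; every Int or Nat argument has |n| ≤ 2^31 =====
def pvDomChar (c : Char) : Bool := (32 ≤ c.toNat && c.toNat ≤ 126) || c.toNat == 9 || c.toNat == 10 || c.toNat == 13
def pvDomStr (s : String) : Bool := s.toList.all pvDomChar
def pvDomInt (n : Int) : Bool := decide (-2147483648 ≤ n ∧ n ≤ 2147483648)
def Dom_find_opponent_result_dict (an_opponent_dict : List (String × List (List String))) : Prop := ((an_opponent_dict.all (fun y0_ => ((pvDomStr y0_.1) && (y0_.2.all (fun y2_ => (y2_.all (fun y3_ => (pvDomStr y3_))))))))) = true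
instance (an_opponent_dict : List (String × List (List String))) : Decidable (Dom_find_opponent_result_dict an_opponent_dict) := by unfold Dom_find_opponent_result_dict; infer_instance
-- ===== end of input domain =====

-- B classifies each opponent by sorting the first results and comparing smallest vs largest
-- (mixed iff min != max) instead of A's sentinel-plus-early-break mismatch scan (objective: alternative).


-- ===== PORT A =====
-- f[0] for a fight f (none = IndexError; the default "" is only reached outside Pre_)
def pvFst0 (f : List String) : String := (PySem.List.pyGet? f 0).getD ""

-- A's inner loop: 'for f in some_fights: if f[0] != initial: result = 0; break'
def pvScanA (initial : String) (result : Int) : List (List String) → Int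
  | [] => result
  | f :: rest => if pvFst0 f ≠ initial then 0 else pvScanA initial result rest

def find_opponent_result_dict (an_opponent_dict : List (String × List (List String))) : List (String × Int) :=
  let dd : PySem.Dict String (List (List String)) := PySem.Dict.mk an_opponent_dict
  (dd.keys.foldl (fun (result_dict : PySem.Dict String Int) k =>
      let some_fights := dd.getD k []          -- an_opponent_dict[k]; k comes from keys(), so no KeyError
      let initial := pvFst0 ((PySem.List.pyGet? some_fights 0).getD [])   -- some_fights[0][0]
      let result : Int := if initial = "Win" then 1 else -1
      result_dict.insert k (pvScanA initial result some_fights)) PySem.Dict.empty).items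

-- ===== PORT B =====
def find_opponent_result_dict_alt (an_opponent_dict : List (String × List (List String))) : List (String × Int) :=
  (an_opponent_dict.foldl (fun (result_dict : PySem.Dict String Int) kv =>
      let firsts := PySem.List.sorted (kv.2.map pvFst0) (fun x => x) false   -- sorted(f[0] for f in fights)
      result_dict.insert kv.1
        (if (PySem.List.pyGet? firsts 0).getD "" ≠ (PySem.List.pyGet? firsts (-1)).getD "" then 0
         else if (PySem.List.pyGet? firsts 0).getD "" = "Win" then 1 else -1))
    PySem.Dict.empty).items

-- ===== PRECONDITION & SPEC =====
-- Pre_ excludes inputs containing an empty fight or an empty fight list, on which the Python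
-- programs raise IndexError (except that A's early break can skip an empty fight occurring after
-- a mismatch and still return, where B raises), and duplicate keys, which a Python dict cannot contain.
def Pre_find_opponent_result_dict (an_opponent_dict : List (String × List (List String))) : Prop :=
  (an_opponent_dict.map Prod.fst).Nodup ∧
  ∀ p ∈ an_opponent_dict, p.2 ≠ [] ∧ ∀ f ∈ p.2, f ≠ []
instance (an_opponent_dict : List (String × List (List String))) : Decidable (Pre_find_opponent_result_dict an_opponent_dict) := by unfold Pre_find_opponent_result_dict; infer_instance

def pvWitness_find_opponent_result_dict : (List (String × List (List String))) :=
  [("x", [["Win"], ["Win"]]), ("y", [["Loss"]]), ("z", [["Win"], ["Loss"]])]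

def Spec_find_opponent_result_dict (an_opponent_dict : List (String × List (List String))) (out : List (String × Int)) : Prop := out = find_opponent_result_dict_alt an_opponent_dict
instance (an_opponent_dict : List (String × List (List String))) (out : List (String × Int)) : Decidable (Spec_find_opponent_result_dict an_opponent_dict out) := by unfold Spec_find_opponent_result_dict; infer_instance

-- ===== CLAIM (what is proved, stated in full; the proofs are below) =====
def Claim_equal_find_opponent_result_dict : Prop := ∀ (an_opponent_dict : List (String × List (List String))), Dom_find_opponent_result_dict an_opponent_dict → Pre_find_opponent_result_dict an_opponent_dict → Spec_find_opponent_result_dict an_opponent_dict (find_opponent_result_dict an_opponent_dict)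

-- ===== LEMMAS AND PROOFS =====

-- A's inner scan returns the sentinel iff every fight's first entry equals initial, else 0.
lemma pvScanA_eq (initial : String) (result : Int) (l : List (List String)) :
    pvScanA initial result l = if ∀ f ∈ l, pvFst0 f = initial then result else 0 := by
  induction l with
  | nil => simp [pvScanA]
  | cons f rest ih =>
      by_cases h : pvFst0 f = initial
      · simp [pvScanA, h, ih]
      · simp [pvScanA, h]

-- sorted(a::xs)[0] = sorted(a::xs)[-1] iff every element equals a, in which case both ends equal a.
lemma pv_sorted_ends (a : String) (xs : List String) :
    ((PySem.List.pyGet? (PySem.List.sorted (a :: xs) (fun x => x) false) 0).getD "" =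
       (PySem.List.pyGet? (PySem.List.sorted (a :: xs) (fun x => x) false) (-1)).getD ""
     ↔ ∀ y ∈ xs, y = a) ∧
    ((∀ y ∈ xs, y = a) →
       (PySem.List.pyGet? (PySem.List.sorted (a :: xs) (fun x => x) false) 0).getD "" = a) := by
  set s := PySem.List.sorted (a :: xs) (fun x => x) false with hs
  have hlen : s.length = xs.length + 1 := by
    rw [hs, PySem.List.length_sorted]; simp
  have hpos : 0 < s.length := by omega
  have h0 : (PySem.List.pyGet? s 0).getD "" = s[0] := by
    rw [PySem.List.pyGet?_zero, List.getElem?_eq_getElem hpos]; rfl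
  have hlast : (PySem.List.pyGet? s (-1)).getD "" = s[s.length - 1] := by
    rw [PySem.List.pyGet?_neg_one, List.getLast?_eq_getElem?, List.getElem?_eq_getElem (by omega)]
    rfl
  have hmem : ∀ y, y ∈ s ↔ y ∈ a :: xs := by
    intro y; rw [hs]; exact PySem.List.mem_sorted (a :: xs) (fun x => x) false y
  have hmono : ∀ (p q : Nat) (hpq : p ≤ q) (hq : q < s.length),
      s[p]'(lt_of_le_of_lt hpq hq) ≤ s[q] := by
    intro p q hpq hq
    exact PySem.List.sorted_id_getElem_mono (a :: xs) hpq hq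
  rw [h0, hlast]
  constructor
  · constructor
    · -- ends equal → all equal a
      intro hends y hy
      have hall : ∀ z ∈ s, z = s[0] := by
        intro z hz
        rcases List.mem_iff_getElem.1 hz with ⟨i, hi, rfl⟩
        have h1 : s[0] ≤ s[i] := hmono 0 i (by omega) hi
        have h2 : s[i] ≤ s[s.length - 1] := hmono i (s.length - 1) (by omega) (by omega)
        rw [← hends] at h2
        exact le_antisymm h2 h1
      have ha : a = s[0] := hall a ((hmem a).2 (List.mem_cons_self))
      have hy' : y = s[0] := hall y ((hmem y).2 (List.mem_cons_of_mem a hy))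
      rw [hy', ha]
    · -- all equal a → ends equal
      intro hall
      have hone : ∀ z ∈ s, z = a := by
        intro z hz
        rcases List.mem_cons.1 ((hmem z).1 hz) with h | h
        · exact h
        · exact hall z h
      rw [hone s[0] (s.getElem_mem hpos), hone s[s.length - 1] (s.getElem_mem (by omega))]
  · intro hall
    have hone : ∀ z ∈ s, z = a := by
      intro z hz
      rcases List.mem_cons.1 ((hmem z).1 hz) with h | h
      · exact h
      · exact hall z h
    exact hone s[0] (s.getElem_mem hpos)

-- per-opponent value: A's scan equals B's sorted-ends branch on a nonempty fight list
lemma pvEntry_eq (f0 : List String) (rest : List (List String)) :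
    pvScanA (pvFst0 f0) (if pvFst0 f0 = "Win" then 1 else -1) (f0 :: rest) =
      (let firsts := PySem.List.sorted ((f0 :: rest).map pvFst0) (fun x => x) false
       if (PySem.List.pyGet? firsts 0).getD "" ≠ (PySem.List.pyGet? firsts (-1)).getD "" then 0
       else if (PySem.List.pyGet? firsts 0).getD "" = "Win" then (1 : Int) else -1) := by
  rw [List.map_cons]
  obtain ⟨hiff, hhead⟩ := pv_sorted_ends (pvFst0 f0) (rest.map pvFst0)
  have hstep : pvScanA (pvFst0 f0) (if pvFst0 f0 = "Win" then 1 else -1) (f0 :: rest) =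
      pvScanA (pvFst0 f0) (if pvFst0 f0 = "Win" then 1 else -1) rest := by
    simp [pvScanA]
  rw [hstep, pvScanA_eq]
  by_cases h : ∀ f ∈ rest, pvFst0 f = pvFst0 f0
  · have hall : ∀ y ∈ rest.map pvFst0, y = pvFst0 f0 := by
      intro y hy
      rcases List.mem_map.1 hy with ⟨f, hf, rfl⟩
      exact h f hf
    have hends := hiff.2 hall
    rw [hhead hall] at hends
    rw [if_pos h]
    simp only [hhead hall]
    rw [if_neg (not_not.2 hends)]
  · have hall : ¬ ∀ y ∈ rest.map pvFst0, y = pvFst0 f0 := by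
      intro hc
      exact h fun f hf => hc (pvFst0 f) (List.mem_map_of_mem hf)
    rw [if_neg h, if_pos (fun hc => hall (hiff.1 hc))]

theorem find_opponent_result_dict_spec_aux (d : List (String × List (List String)))
    (hpre : Pre_find_opponent_result_dict d) :
    find_opponent_result_dict d = find_opponent_result_dict_alt d := by
  obtain ⟨hnodup, hne⟩ := hpre
  unfold find_opponent_result_dict find_opponent_result_dict_alt
  dsimp only
  congr 1
  rw [show (PySem.Dict.mk d).keys = d.map Prod.fst from PySem.Dict.keys_mk d, List.foldl_map]
  apply PySem.List.foldl_congr_mem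
  intro acc kv hkv
  have hget : (PySem.Dict.mk d).getD kv.1 [] = kv.2 := by
    apply PySem.Dict.getD_of_mem_items
    · show (kv.1, kv.2) ∈ d; simpa using hkv
    · rw [PySem.Dict.keys_mk]; exact hnodup
  rw [hget]
  rcases hfights : kv.2 with _ | ⟨f0, rest⟩
  · exact absurd hfights (hne kv hkv).1
  · have h0 : (PySem.List.pyGet? (f0 :: rest) 0).getD [] = f0 := by
      simp [PySem.List.pyGet?, PySem.List.pyIdx?]
    simp only [h0, pvEntry_eq]

-- ===== VERDICT (by name: the statement is the Claim_ definition above) =====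
theorem find_opponent_result_dict_spec : Claim_equal_find_opponent_result_dict := by
  intro d _ hpre
  unfold Spec_find_opponent_result_dict
  exact find_opponent_result_dict_spec_aux d hpre
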